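-- pv_equiv track=rewrite | github.com/J-Dot-Allen/xy_synth_new | dataset_preparation.py | get_value_sets
-- ===== SOURCE A (Python) =====
-- def get_value_sets(Presets, param_labels):
--     dataset = []
--     for preset in Presets:
--         param_values = [None]*len(param_labels)
--         # iterate over param_labels
--         for index, param_label in enumerate(param_labels):
--             if param_label in preset['param_set']:
--                 # get param with param_label
--                 param = preset['param_set'][param_label]
--                 # write param value at correct index into param_values
--                 param_values[index] = param['value']
--         dataset.append(param_values)
--     return dataset
-- ===== SOURCE B (Python) =====
-- def get_value_sets(Presets, param_labels):
--     # label -> list of all indices where it appears in param_labels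
--     index_map = {}
--     for i, label in enumerate(param_labels):
--         index_map.setdefault(label, []).append(i)
--     dataset = []
--     for preset in Presets:
--         row = [None] * len(param_labels)
--         for label, param in preset['param_set'].items():
--             for i in index_map.get(label, []):
--                 row[i] = param['value']
--         dataset.append(row)
--     return dataset
-- ===== Notes on version B (the rewrite author's own statement) =====
-- stated objective: alternative
-- what changed: B precomputes one label->indices table from param_labels and then, per preset, iterates only over the params the preset actually has, writing each value at all matching indices, instead of rescanning every label per preset.
-- outside the precondition, e.g. on get_value_sets([{}], []): A returns [[]], B raises KeyError
import Mathlib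
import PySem

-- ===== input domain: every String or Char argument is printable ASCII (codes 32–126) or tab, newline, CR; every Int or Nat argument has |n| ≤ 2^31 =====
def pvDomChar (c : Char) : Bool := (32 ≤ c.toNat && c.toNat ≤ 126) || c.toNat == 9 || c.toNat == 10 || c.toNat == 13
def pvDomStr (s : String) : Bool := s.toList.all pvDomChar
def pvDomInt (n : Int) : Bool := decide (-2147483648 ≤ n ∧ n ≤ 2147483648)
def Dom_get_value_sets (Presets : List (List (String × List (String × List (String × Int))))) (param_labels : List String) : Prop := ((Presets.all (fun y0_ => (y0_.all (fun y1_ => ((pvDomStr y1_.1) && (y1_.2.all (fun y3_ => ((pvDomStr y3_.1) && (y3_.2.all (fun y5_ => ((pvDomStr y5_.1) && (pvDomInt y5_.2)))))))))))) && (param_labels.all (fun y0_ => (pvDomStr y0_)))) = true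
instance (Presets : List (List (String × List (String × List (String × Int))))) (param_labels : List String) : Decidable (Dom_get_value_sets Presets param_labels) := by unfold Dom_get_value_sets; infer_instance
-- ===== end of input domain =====

-- B replaces A's per-preset rescan of every label with one precomputed label→indices table
-- consulted only for the params the preset actually has (objective: alternative decomposition).

-- ===== PORT A =====
-- Literal port of A: for each preset, start from a row of Nones, loop over enumerate(param_labels),
-- and where the label is a key of preset['param_set'] write that param's 'value' at the label's index.
-- 'if label in d: p = d[label]' is ported as one match on first-match lookup; a `none` from the
-- 'param_set' / 'value' lookups is Python's KeyError, excluded by Pre_ (the port then leaves the row cell unchanged).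
def get_value_sets (Presets : List (List (String × List (String × List (String × Int))))) (param_labels : List String) : List (List (Option Int)) :=
  Presets.foldl (fun dataset preset =>
    let param_values :=
      (PySem.List.enumerate param_labels 0).foldl (fun pv il =>
        match (PySem.Dict.mk preset).get? "param_set" with
        | none => pv
        | some ps =>
          match (PySem.Dict.mk ps).get? il.2 with
          | none => pv
          | some param => pv.set il.1.toNat (some (((PySem.Dict.mk param).get? "value").getD 0)))
        (List.replicate param_labels.length (none : Option Int))
    dataset ++ [param_values]) []

-- ===== PORT B =====
-- Literal port of Source B: build index_map : label → list of indices once, then per preset loop over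
-- the params of preset['param_set'] and write each value at all of its label's indices.
-- `.getD []` on the 'param_set' lookup is Python's KeyError (excluded by Pre_).
def get_value_sets_alt (Presets : List (List (String × List (String × List (String × Int))))) (param_labels : List String) : List (List (Option Int)) :=
  let index_map : PySem.Dict String (List Int) :=
    (PySem.List.enumerate param_labels 0).foldl
      (fun d il => d.modify il.2 [] (fun l => l ++ [il.1])) PySem.Dict.empty
  Presets.foldl (fun dataset preset =>
    let ps := ((PySem.Dict.mk preset).get? "param_set").getD []
    let row := ps.foldl (fun row lp =>
      (index_map.getD lp.1 []).foldl
        (fun row i => row.set i.toNat (some (((PySem.Dict.mk lp.2).get? "value").getD 0))) row)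
      (List.replicate param_labels.length (none : Option Int))
    dataset ++ [row]) []

-- ===== PRECONDITION & SPEC =====
-- Pre_ excludes (a) presets without a 'param_set' key (Python A raises KeyError there except in the
-- degenerate case param_labels = [], where A returns but B still raises — see claim cites), (b) a matched
-- param without a 'value' key (A raises KeyError), and (c) association lists with duplicate keys at any
-- dict level, which denote no Python dict (a dict's keys are unique; lookup order on such lists is accidental).
def pvPreCheck (Presets : List (List (String × List (String × List (String × Int))))) (param_labels : List String) : Bool :=
  Presets.all (fun preset =>
    decide ((preset.map Prod.fst).Nodup) &&
    ((PySem.Dict.mk preset).get? "param_set").elim false (fun ps =>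
       decide ((ps.map Prod.fst).Nodup) &&
       ps.all (fun lp =>
         decide ((lp.2.map Prod.fst).Nodup) &&
         (!(param_labels.contains lp.1) || ((PySem.Dict.mk lp.2).get? "value").isSome))))

def Pre_get_value_sets (Presets : List (List (String × List (String × List (String × Int))))) (param_labels : List String) : Prop :=
  pvPreCheck Presets param_labels = true
instance (Presets : List (List (String × List (String × List (String × Int))))) (param_labels : List String) : Decidable (Pre_get_value_sets Presets param_labels) := by unfold Pre_get_value_sets; infer_instance

def pvWitness_get_value_sets : (List (List (String × List (String × List (String × Int))))) × List String :=
  ([[("param_set", [("cutoff", [("value", 3)]), ("extra", [("value", 7)])])],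
    [("param_set", [("reso", [("value", -2)])])]],
   ["cutoff", "reso", "cutoff"])

def Spec_get_value_sets (Presets : List (List (String × List (String × List (String × Int))))) (param_labels : List String) (out : List (List (Option Int))) : Prop := out = get_value_sets_alt Presets param_labels
instance (Presets : List (List (String × List (String × List (String × Int))))) (param_labels : List String) (out : List (List (Option Int))) : Decidable (Spec_get_value_sets Presets param_labels out) := by unfold Spec_get_value_sets; infer_instance

-- ===== CLAIM (what is proved, stated in full; the proofs are below) =====
def Claim_equal_get_value_sets : Prop := ∀ (Presets : List (List (String × List (String × List (String × Int))))) (param_labels : List String), Dom_get_value_sets Presets param_labels → Pre_get_value_sets Presets param_labels → Spec_get_value_sets Presets param_labels (get_value_sets Presets param_labels)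

-- ===== LEMMAS AND PROOFS =====

-- the value A writes at a position whose label is `label` (none if the preset lacks the label)
def valOf (ps : List (String × List (String × Int))) (label : String) : Option Int :=
  match (PySem.Dict.mk ps).get? label with
  | none => none
  | some p => some (((PySem.Dict.mk p).get? "value").getD 0)

lemma foldA (ps : List (String × List (String × Int))) (ls : List String) :
    ∀ (pre : List (Option Int)),
    (PySem.List.enumerate ls (pre.length : Int)).foldl (fun pv il =>
        match (PySem.Dict.mk ps).get? il.2 with
        | none => pv
        | some param => pv.set il.1.toNat (some (((PySem.Dict.mk param).get? "value").getD 0)))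
      (pre ++ List.replicate ls.length none)
    = pre ++ ls.map (valOf ps) := by
  intro pre
  induction ls generalizing pre with
  | nil => simp
  | cons l ls ih =>
    rw [PySem.List.enumerate_cons, List.foldl_cons]
    cases h : (PySem.Dict.mk ps).get? l with
    | none =>
      have := ih (pre ++ [none])
      simp only [List.length_append, List.length_cons, List.length_nil] at this
      push_cast at this
      simpa [valOf, h, List.replicate_succ] using this
    | some param =>
      have := ih (pre ++ [some (((PySem.Dict.mk param).get? "value").getD 0)])
      simp only [List.length_append, List.length_cons, List.length_nil] at this
      push_cast at this
      simpa [valOf, h, List.replicate_succ, List.set_append] using this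

lemma foldSet_length (xs : List Int) (v : Option Int) :
    ∀ (r : List (Option Int)),
    (xs.foldl (fun r i => r.set i.toNat v) r).length = r.length := by
  induction xs with
  | nil => intro r; rfl
  | cons i xs ih => intro r; simpa using ih (r.set i.toNat v)

lemma foldSet_get_of_not_mem (xs : List Int) (v : Option Int) :
    ∀ (r : List (Option Int)) (j : Nat), (∀ i ∈ xs, i.toNat ≠ j) →
    (xs.foldl (fun r i => r.set i.toNat v) r)[j]? = r[j]? := by
  induction xs with
  | nil => intro r j _; rfl
  | cons i xs ih =>
    intro r j h
    rw [List.foldl_cons, ih _ _ (fun i' hi' => h i' (List.mem_cons_of_mem _ hi')),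
      List.getElem?_set_ne (h i (List.mem_cons_self ..))]

lemma foldSet_get_of_mem (xs : List Int) (v : Option Int) :
    ∀ (r : List (Option Int)) (j : Nat), (∃ i ∈ xs, i.toNat = j) → j < r.length →
    (xs.foldl (fun r i => r.set i.toNat v) r)[j]? = some v := by
  induction xs with
  | nil => rintro r j ⟨i, hi, -⟩; exact absurd hi (List.not_mem_nil)
  | cons i xs ih =>
    rintro r j ⟨i', hi', hij⟩ hj
    rw [List.foldl_cons]
    by_cases hx : ∃ i'' ∈ xs, i''.toNat = j
    · exact ih _ _ hx (by simpa using hj)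
    · push Not at hx
      have hi : i.toNat = j := by
        rcases List.mem_cons.mp hi' with h | h
        · exact h ▸ hij
        · exact absurd hij (hx _ h)
      rw [foldSet_get_of_not_mem _ _ _ _ hx, hi, List.getElem?_set_self hj]

-- the index map of B, named for the proofs
def idxMapOf (ls : List String) : PySem.Dict String (List Int) :=
  (PySem.List.enumerate ls 0).foldl
    (fun d il => d.modify il.2 [] (fun l => l ++ [il.1])) PySem.Dict.empty

lemma getD_idxMapOf (ls : List String) (c : String) :
    (idxMapOf ls).getD c []
    = (((PySem.List.enumerate ls 0).map (fun il => (il.2, il.1))).filter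
        (fun p => p.1 == c)).map (·.2) := by
  unfold idxMapOf
  rw [← List.foldl_map (f := fun il : Int × String => (il.2, il.1))
      (g := fun (d : PySem.Dict String (List Int)) p => d.modify p.1 [] (fun l => l ++ [p.2]))]
  rw [PySem.Dict.getD_foldl_modify_append]
  simp

lemma exists_mem_idx (ls : List String) (c : String) (j : Nat) :
    (∃ i ∈ (idxMapOf ls).getD c [], i.toNat = j) ↔ (∃ h : j < ls.length, ls[j] = c) := by
  rw [getD_idxMapOf]
  simp [List.mem_filter, PySem.List.mem_enumerate_iff]

lemma foldB (ls : List String) :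
    ∀ (ps : List (String × List (String × Int))), (ps.map Prod.fst).Nodup →
    ∀ (r : List (Option Int)), r.length = ls.length → ∀ (j : Nat) (hj : j < ls.length),
    (ps.foldl (fun row lp =>
        ((idxMapOf ls).getD lp.1 []).foldl
          (fun row i => row.set i.toNat (some (((PySem.Dict.mk lp.2).get? "value").getD 0))) row)
      r)[j]?
    = match (PySem.Dict.mk ps).get? ls[j] with
      | none => r[j]?
      | some p => some (some (((PySem.Dict.mk p).get? "value").getD 0)) := by
  intro ps
  induction ps with
  | nil => intro _ r hr j hj; simp [PySem.Dict.get?]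
  | cons lp ps ih =>
    intro hnd r hr j hj
    rw [List.map_cons, List.nodup_cons] at hnd
    rw [List.foldl_cons,
      ih hnd.2 _ (by rw [foldSet_length]; exact hr) j hj,
      PySem.Dict.get?_mk_cons]
    by_cases hl : lp.1 = ls[j]
    · have hget : (PySem.Dict.mk ps).get? ls[j] = none := by
        rw [PySem.Dict.get?_eq_none_iff_not_mem_keys]
        simpa [← hl] using hnd.1
      rw [hget, if_pos (by simp [hl])]
      exact foldSet_get_of_mem _ _ _ _ ((exists_mem_idx ls lp.1 j).mpr ⟨hj, hl.symm⟩)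
        (by rw [hr]; exact hj)
    · have hno : ∀ i ∈ (idxMapOf ls).getD lp.1 [], i.toNat ≠ j := by
        intro i hi hij
        obtain ⟨hj2, he⟩ := (exists_mem_idx ls lp.1 j).mp ⟨i, hi, hij⟩
        exact hl he.symm
      rw [if_neg (by simpa using hl), foldSet_get_of_not_mem _ _ _ _ hno]

lemma foldB_length (ls : List String) (ps : List (String × List (String × Int))) :
    ∀ (r : List (Option Int)),
    (ps.foldl (fun row lp =>
        ((idxMapOf ls).getD lp.1 []).foldl
          (fun row i => row.set i.toNat (some (((PySem.Dict.mk lp.2).get? "value").getD 0))) row)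
      r).length = r.length := by
  induction ps with
  | nil => intro r; rfl
  | cons lp ps ih => intro r; rw [List.foldl_cons, ih, foldSet_length]

lemma rowB_eq (ls : List String) (ps : List (String × List (String × Int)))
    (hnd : (ps.map Prod.fst).Nodup) :
    ps.foldl (fun row lp =>
        ((idxMapOf ls).getD lp.1 []).foldl
          (fun row i => row.set i.toNat (some (((PySem.Dict.mk lp.2).get? "value").getD 0))) row)
      (List.replicate ls.length none)
    = ls.map (valOf ps) := by
  apply List.ext_getElem?
  intro j
  by_cases hj : j < ls.length
  · rw [foldB ls ps hnd _ (by simp) j hj]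
    cases h : (PySem.Dict.mk ps).get? ls[j] <;>
      simp [valOf, h, hj]
  · rw [List.getElem?_eq_none, List.getElem?_eq_none]
    · simpa using Nat.le_of_not_lt hj
    · rw [foldB_length]; simpa using Nat.le_of_not_lt hj

-- ===== VERDICT (by name: the statement is the Claim_ definition above) =====
theorem get_value_sets_spec : Claim_equal_get_value_sets := by
  intro Presets param_labels _ hpre
  unfold Spec_get_value_sets get_value_sets get_value_sets_alt
  rw [PySem.List.foldl_append_singleton_eq_map, PySem.List.foldl_append_singleton_eq_map]
  simp only [List.nil_append]
  apply List.map_congr_left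
  intro preset hmem
  simp only [Pre_get_value_sets, pvPreCheck, List.all_eq_true] at hpre
  have hps0 := hpre preset hmem
  rw [Bool.and_eq_true] at hps0
  cases h : (PySem.Dict.mk preset).get? "param_set" with
  | none => rw [h, Option.elim_none] at hps0; exact absurd hps0.2 (by simp)
  | some ps =>
    rw [h, Option.elim_some, Bool.and_eq_true] at hps0
    have hndps : (ps.map Prod.fst).Nodup := by simpa using hps0.2.1
    have hA := foldA ps param_labels []
    simp only [List.length_nil, Nat.cast_zero, List.nil_append] at hA
    exact hA.trans (rowB_eq param_labels ps hndps).symm
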